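-- pv_equiv track=rewrite | github.com/cfd-dev/PyMeshGen | delaunay/bw_core_stable.py | _find_path_in_boundary
-- ===== SOURCE A (Python) =====
-- def _find_path_in_boundary(adjacency, start, end, exclude=None):
--     """在边界上找到从 start 到 end 的路径。
--
--     使用简单的 BFS 路径查找。
--
--     参数:
--         adjacency: 邻接表 {node: [neighbors]}
--         start: 起始节点
--         end: 结束节点
--         exclude: 排除的节点列表
--
--     返回:
--         路径节点列表 [start, ..., end]
--     """
--     from collections import deque
--
--     if exclude is None:
--         exclude = set()
--
--     # 简单的 BFS 路径查找
--     queue = deque([(start, [start])])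
--     visited = {start}
--
--     while queue:
--         current, path = queue.popleft()
--
--         if current == end:
--             return path
--
--         for neighbor in adjacency.get(current, []):
--             if neighbor in visited:
--                 continue
--
--             # 跳过被排除的节点
--             if neighbor in exclude:
--                 continue
--
--             visited.add(neighbor)
--             queue.append((neighbor, path + [neighbor]))
--
--     return None
-- ===== SOURCE B (Python) =====
-- from collections import deque
--
--
-- def _rebuild(parent, node):
--     """Walk the parent pointers back to the root, prepending onto a deque."""
--     path = deque([node])
--     prev = parent.get(node)
--     while prev is not None:
--         path.appendleft(prev)
--         node = prev
--         prev = parent.get(node)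
--     return list(path)
--
--
-- def _find_path_in_boundary(adjacency, start, end, exclude=None):
--     """BFS over a two-stack queue of bare nodes; parent pointers are laid down at
--     discovery time and the path is rebuilt once, at the end."""
--     excluded = set(exclude) if exclude is not None else set()
--     parent = {}
--     visited = {start}
--     front = [start]
--     back = []
--
--     while front or back:
--         if not front:
--             front = back[::-1]
--             back = []
--         current = front.pop()
--
--         if current == end:
--             return _rebuild(parent, current)
--
--         for neighbor in adjacency.get(current, []):
--             if neighbor not in visited and neighbor not in excluded:
--                 visited.add(neighbor)
--                 parent[neighbor] = current
--                 back.append(neighbor)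
--
--     return None
-- ===== Notes on version B (the rewrite author's own statement) =====
-- stated objective: alternative
-- what changed: BFS carries bare nodes in a two-stack (front/back) queue with a parent-pointer dict laid down at discovery, rebuilding the path once at the end, instead of copying the whole prefix path into every queue entry.
import Mathlib
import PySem

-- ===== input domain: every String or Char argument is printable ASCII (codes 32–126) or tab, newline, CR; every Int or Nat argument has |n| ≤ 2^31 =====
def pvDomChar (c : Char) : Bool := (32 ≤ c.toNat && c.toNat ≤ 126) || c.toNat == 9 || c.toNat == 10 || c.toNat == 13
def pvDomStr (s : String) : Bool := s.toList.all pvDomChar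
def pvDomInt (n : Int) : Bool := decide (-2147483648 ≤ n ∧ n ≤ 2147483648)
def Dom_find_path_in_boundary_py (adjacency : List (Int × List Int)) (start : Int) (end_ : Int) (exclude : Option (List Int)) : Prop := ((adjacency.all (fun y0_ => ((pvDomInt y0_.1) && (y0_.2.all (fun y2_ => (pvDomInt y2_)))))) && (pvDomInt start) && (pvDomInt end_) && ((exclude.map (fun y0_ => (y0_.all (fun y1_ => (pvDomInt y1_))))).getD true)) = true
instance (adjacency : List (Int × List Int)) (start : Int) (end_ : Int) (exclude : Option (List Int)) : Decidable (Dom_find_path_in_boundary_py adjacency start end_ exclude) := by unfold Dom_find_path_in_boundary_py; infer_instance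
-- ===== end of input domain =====

-- B replaces A's path-copying BFS (each queue entry carries a full copy of its path) by a
-- two-stack-queue BFS over bare nodes with parent pointers, the path being rebuilt once at
-- the end; same return value everywhere (an alternative algorithm).

-- shared helper: adjacency.get(current, []) — first-match association-list lookup
def pvAdjGet (adjacency : List (Int × List Int)) (c : Int) : List Int :=
  match adjacency.find? (fun p => p.1 == c) with
  | some p => p.2
  | none => []

-- totality fuel for the while-loops: the BFS dequeues at most 1 + (total neighbor count) nodes
def pvFuel (adjacency : List (Int × List Int)) : Nat :=
  2 + adjacency.foldl (fun a p => a + p.2.length) 0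

-- ===== PORT A =====
def pvALoop (adjacency : List (Int × List Int)) (end_ : Int) (excl : List Int) :
    Nat → List (Int × List Int) → PySem.Set Int → Option (List Int)
  | 0, _, _ => none
  | _ + 1, [], _ => none
  | f + 1, (current, path) :: rest, visited =>
    if current = end_ then some path
    else
      let st := (pvAdjGet adjacency current).foldl
        (fun (st : List (Int × List Int) × PySem.Set Int) neighbor =>
          if PySem.Set.contains st.2 neighbor then st
          else if excl.contains neighbor then st
          else (st.1 ++ [(neighbor, path ++ [neighbor])], PySem.Set.add st.2 neighbor))
        (rest, visited)
      pvALoop adjacency end_ excl f st.1 st.2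

def find_path_in_boundary_py (adjacency : List (Int × List Int)) (start : Int) (end_ : Int) (exclude : Option (List Int)) : Option (List Int) :=
  let excl := exclude.getD []   -- 'exclude = set()' when None: membership in [] is the same test
  pvALoop adjacency end_ excl (pvFuel adjacency) [(start, [start])] (PySem.Set.ofList [start])

-- ===== PORT B =====
-- _rebuild: path = deque([node]); while prev is not None: path.appendleft(prev)
def pvRebuild (parent : PySem.Dict Int Int) : Nat → Int → List Int → List Int
  | 0, _, path => path
  | f + 1, node, path =>
    match parent.get? node with
    | none => path
    | some prev => pvRebuild parent f prev (prev :: path)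

-- 'for neighbor in adjacency.get(current, []): …' — recursion over the neighbor list
def pvScan (excl : PySem.Set Int) (current : Int) :
    List Int → PySem.Dict Int Int → PySem.Set Int → List Int →
    PySem.Dict Int Int × PySem.Set Int × List Int
  | [], parent, visited, back => (parent, visited, back)
  | nb :: ns, parent, visited, back =>
    if !PySem.Set.contains visited nb && !PySem.Set.contains excl nb then
      pvScan excl current ns (parent.insert nb current) (PySem.Set.add visited nb) (back ++ [nb])
    else
      pvScan excl current ns parent visited back

-- 'while front or back:' — two-stack queue, popping from the end of front
def pvBMain (adjacency : List (Int × List Int)) (end_ : Int) (excl : PySem.Set Int) :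
    Nat → List Int → List Int → PySem.Dict Int Int → PySem.Set Int → Option (List Int)
  | 0, _, _, _, _ => none
  | f + 1, front, back, parent, visited =>
    if front.isEmpty && back.isEmpty then none
    else
      let fr := if front.isEmpty then back.reverse else front
      let bk := if front.isEmpty then ([] : List Int) else back
      match fr.getLast? with
      | none => none   -- unreachable (fr is nonempty here); totality artifact only
      | some current =>
        if current = end_ then
          some (pvRebuild parent parent.items.length current [current])
        else
          let st := pvScan excl current (pvAdjGet adjacency current) parent visited bk
          pvBMain adjacency end_ excl f fr.dropLast st.2.2 st.1 st.2.1

def find_path_in_boundary_py_alt (adjacency : List (Int × List Int)) (start : Int) (end_ : Int) (exclude : Option (List Int)) : Option (List Int) :=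
  let excl := PySem.Set.ofList (exclude.getD [])
  pvBMain adjacency end_ excl (pvFuel adjacency) [start] [] PySem.Dict.empty (PySem.Set.ofList [start])

-- ===== PRECONDITION & SPEC =====
def Spec_find_path_in_boundary_py (adjacency : List (Int × List Int)) (start : Int) (end_ : Int) (exclude : Option (List Int)) (out : Option (List Int)) : Prop := out = find_path_in_boundary_py_alt adjacency start end_ exclude
instance (adjacency : List (Int × List Int)) (start : Int) (end_ : Int) (exclude : Option (List Int)) (out : Option (List Int)) : Decidable (Spec_find_path_in_boundary_py adjacency start end_ exclude out) := by unfold Spec_find_path_in_boundary_py; infer_instance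

-- ===== CLAIM (what is proved, stated in full; the proofs are below) =====
def Claim_equal_find_path_in_boundary_py : Prop := ∀ (adjacency : List (Int × List Int)) (start : Int) (end_ : Int) (exclude : Option (List Int)), Dom_find_path_in_boundary_py adjacency start end_ exclude → Spec_find_path_in_boundary_py adjacency start end_ exclude (find_path_in_boundary_py adjacency start end_ exclude)

-- ===== LEMMAS AND PROOFS =====

-- 'pvUp parent c u' : u = [c, parent c, …, root] is the complete parent chain above c
inductive pvUp (parent : PySem.Dict Int Int) : Int → List Int → Prop
  | base (c : Int) (h : parent.get? c = none) : pvUp parent c [c]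
  | step (c m : Int) (l : List Int) (h : parent.get? c = some m) (hm : pvUp parent m l) :
      pvUp parent c (c :: l)

theorem pvUp_head {parent : PySem.Dict Int Int} {c : Int} {u : List Int}
    (h : pvUp parent c u) : ∃ t, u = c :: t := by
  cases h with
  | base c h => exact ⟨[], rfl⟩
  | step c m l h hm => exact ⟨l, rfl⟩

-- rebuilding by prepending produces the reversed parent chain
theorem pvUp_rebuild {parent : PySem.Dict Int Int} {c : Int} {u : List Int}
    (h : pvUp parent c u) : ∀ (f : Nat), u.length ≤ f + 1 → ∀ (acc : List Int),
      pvRebuild parent f c acc = u.tail.reverse ++ acc := by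
  induction h with
  | base c h =>
    intro f _ acc
    cases f with
    | zero => simp [pvRebuild]
    | succ f => simp [pvRebuild, h]
  | step c m l h hm ih =>
    intro f hf acc
    obtain ⟨t, rfl⟩ := pvUp_head hm
    cases f with
    | zero => simp at hf
    | succ f =>
      simp only [pvRebuild, h]
      rw [ih f (by simpa using hf) (m :: acc)]
      simp

theorem pvUp_insert {parent : PySem.Dict Int Int} {c : Int} {u : List Int}
    (h : pvUp parent c u) {k : Int} (hk : k ∉ u) (v : Int) :
    pvUp (parent.insert k v) c u := by
  induction h with
  | base c h =>
    exact pvUp.base c (by rw [PySem.Dict.get?_insert_of_ne _ _ (by simp at hk; omega)]; exact h)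
  | step c m l h hm ih =>
    refine pvUp.step c m l ?_ (ih (by simp at hk; exact hk.2))
    rw [PySem.Dict.get?_insert_of_ne _ _ (by simp at hk; omega)]; exact h

-- the per-queue-entry relation between A's (node, path) and B's node
def pvEntry (parent : PySem.Dict Int Int) (V : PySem.Set Int)
    (a : Int × List Int) (b : Int) : Prop :=
  a.1 = b ∧ pvUp parent b a.2.reverse ∧ (∀ x ∈ a.2, x ∈ V) ∧
    a.2.length ≤ parent.items.length + 1

theorem pvEntry_grow {parent : PySem.Dict Int Int} {V : PySem.Set Int}
    {a : Int × List Int} {b : Int} (h : pvEntry parent V a b)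
    {nb cur : Int} (hnb : nb ∉ V) :
    pvEntry (parent.insert nb cur) (PySem.Set.add V nb) a b := by
  obtain ⟨h1, h2, h3, h4⟩ := h
  refine ⟨h1, pvUp_insert h2 (fun hm => hnb (h3 nb (by simpa using hm))) cur, ?_, ?_⟩
  · intro x hx; simp [PySem.Set.mem_add]; exact Or.inl (h3 x hx)
  · simp only [PySem.Dict.insert]
    split
    · simp; omega
    · simp; omega

-- set(l) and l decide membership identically
theorem pvContains_ofList (l : List Int) (x : Int) :
    l.contains x = PySem.Set.contains (PySem.Set.ofList l) x := by
  rw [Bool.eq_iff_iff]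
  simp [PySem.Set.mem_ofList]

theorem pvForall₂_append {R : (Int × List Int) → Int → Prop} {a c : List (Int × List Int)} {b d : List Int}
    (h1 : List.Forall₂ R a b) (h2 : List.Forall₂ R c d) : List.Forall₂ R (a ++ c) (b ++ d) := by
  induction h1 with
  | nil => exact h2
  | cons h _ ih => exact List.Forall₂.cons h ih

-- processing one neighbor list keeps the two BFS states in correspondence
-- (A appends entries to its whole queue; B appends bare nodes to its back stack)
theorem pvScan_rel (excl : List Int) (exclS : PySem.Set Int)
    (hEx : ∀ x : Int, excl.contains x = PySem.Set.contains exclS x) (cur : Int) (p : List Int) :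
    ∀ (ns : List Int) (restA : List (Int × List Int)) (L bk : List Int)
      (parent : PySem.Dict Int Int) (V : PySem.Set Int),
      List.Forall₂ (pvEntry parent V) restA (L ++ bk) →
      (∀ k, parent.contains k = true → k ∈ V) →
      pvUp parent cur p.reverse → (∀ x ∈ p, x ∈ V) →
      p.length ≤ parent.items.length + 1 →
      (let stA := ns.foldl
        (fun (st : List (Int × List Int) × PySem.Set Int) neighbor =>
          if PySem.Set.contains st.2 neighbor then st
          else if excl.contains neighbor then st
          else (st.1 ++ [(neighbor, p ++ [neighbor])], PySem.Set.add st.2 neighbor))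
        (restA, V);
      let stB := pvScan exclS cur ns parent V bk;
      stA.2 = stB.2.1 ∧ List.Forall₂ (pvEntry stB.1 stB.2.1) stA.1 (L ++ stB.2.2) ∧
        (∀ k, stB.1.contains k = true → k ∈ stB.2.1)) := by
  intro ns
  induction ns with
  | nil => intro restA L bk parent V h1 h2 _ _ _; exact ⟨rfl, h1, h2⟩
  | cons nb ns ih =>
    intro restA L bk parent V h1 h2 hup hpV hplen
    simp only [List.foldl_cons, pvScan]
    cases hv : PySem.Set.contains V nb with
    | true =>
      simp only [hv, if_true, Bool.not_true, Bool.false_and, Bool.false_eq_true, if_false]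
      exact ih restA L bk parent V h1 h2 hup hpV hplen
    | false =>
      have hex' := hEx nb
      cases hex : excl.contains nb with
      | true =>
        rw [hex] at hex'
        simp only [hv, hex, if_true, ← hex', Bool.not_true, Bool.not_false,
          Bool.true_and, Bool.false_eq_true, if_false]
        exact ih restA L bk parent V h1 h2 hup hpV hplen
      | false =>
        rw [hex] at hex'
        simp only [hv, hex, if_false, ← hex', Bool.not_false, Bool.true_and, if_true]
        -- nb is fresh: both sides enqueue it
        have hnbV : nb ∉ V := fun h => by rw [(PySem.Set.contains_iff V nb).mpr h] at hv; cases hv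
        have hnbp : nb ∉ p := fun h => hnbV (hpV nb h)
        have hcont : parent.contains nb = false := by
          cases hc : parent.contains nb with
          | false => rfl
          | true => exact absurd (h2 nb hc) hnbV
        have hlen' : (parent.insert nb cur).items.length = parent.items.length + 1 := by
          simp only [PySem.Dict.insert, hcont]
          simp
        have hup' : pvUp (parent.insert nb cur) cur p.reverse :=
          pvUp_insert hup (by simpa using hnbp) cur
        have := ih (restA ++ [(nb, p ++ [nb])]) L (bk ++ [nb]) (parent.insert nb cur)
          (PySem.Set.add V nb) ?_ ?_ hup' ?_ ?_
        · simpa using this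
        · rw [← List.append_assoc]
          refine pvForall₂_append (List.Forall₂.imp (fun a b h => pvEntry_grow h hnbV) h1) ?_
          refine List.forall₂_cons.mpr ⟨?_, List.forall₂_nil_left_iff.mpr rfl⟩
          refine ⟨rfl, ?_, ?_, ?_⟩
          · have : (p ++ [nb]).reverse = nb :: p.reverse := by simp
            rw [this]
            exact pvUp.step nb cur p.reverse (PySem.Dict.get?_insert_self parent nb cur) hup'
          · intro x hx
            rcases List.mem_append.mp hx with h | h
            · exact (PySem.Set.mem_add _ _ _).mpr (Or.inl (hpV x h))
            · simp at h; subst h; exact (PySem.Set.mem_add _ _ _).mpr (Or.inr rfl)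
          · simp [hlen']; omega
        · intro k hk
          rw [PySem.Dict.contains_insert] at hk
          rcases Bool.or_eq_true_iff.mp hk with h | h
          · exact (PySem.Set.mem_add _ _ _).mpr (Or.inr (by simpa using (beq_iff_eq.mp h)))
          · exact (PySem.Set.mem_add _ _ _).mpr (Or.inl (h2 k h))
        · intro x hx; exact (PySem.Set.mem_add _ _ _).mpr (Or.inl (hpV x hx))
        · rw [hlen']; omega

-- dequeue on the two-stack queue: popping the last element of fr is taking the head
-- of the logical queue front.reverse ++ back
theorem pvPop (front back : List Int) (cur : Int) (rest : List Int)
    (hQ : front.reverse ++ back = cur :: rest) :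
    (if front.isEmpty then back.reverse else front).getLast? = some cur ∧
      (if front.isEmpty then back.reverse else front).dropLast.reverse ++
        (if front.isEmpty then ([] : List Int) else back) = rest := by
  cases front with
  | nil =>
    simp only [List.reverse_nil, List.nil_append] at hQ
    subst hQ
    simp
  | cons f0 fs =>
    rcases hrev : (f0 :: fs).reverse with _ | ⟨x, xs⟩
    · exact absurd hrev (by simp)
    · rw [hrev] at hQ
      simp only [List.cons_append, List.cons.injEq] at hQ
      obtain ⟨hx, hrest⟩ := hQ
      have hfr : f0 :: fs = xs.reverse ++ [x] := by
        have := congrArg List.reverse hrev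
        simpa using this
      simp only [List.isEmpty_cons, if_neg, Bool.false_eq_true, not_false_iff, hfr,
        List.getLast?_concat, List.dropLast_concat]
      subst hx hrest
      simp

-- the two while-loops agree step for step (A's queue = front.reverse ++ back)
theorem pvLoop_rel (adjacency : List (Int × List Int)) (end_ : Int)
    (excl : List Int) (exclS : PySem.Set Int)
    (hEx : ∀ x : Int, excl.contains x = PySem.Set.contains exclS x) :
    ∀ (f : Nat) (qA : List (Int × List Int)) (front back : List Int)
      (parent : PySem.Dict Int Int) (V : PySem.Set Int),
      List.Forall₂ (pvEntry parent V) qA (front.reverse ++ back) →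
      (∀ k, parent.contains k = true → k ∈ V) →
      pvALoop adjacency end_ excl f qA V = pvBMain adjacency end_ exclS f front back parent V := by
  intro f
  induction f with
  | zero => intro qA front back parent V _ _; rfl
  | succ f ih =>
    intro qA front back parent V h1 h2
    generalize hQ : front.reverse ++ back = Q at h1
    cases h1 with
    | nil =>
      have hf : front = [] ∧ back = [] := by
        rcases List.append_eq_nil_iff.mp hQ with ⟨h3, h4⟩
        exact ⟨by simpa using h3, h4⟩
      obtain ⟨hf, hb⟩ := hf
      subst hf hb
      simp [pvALoop, pvBMain]
    | @cons a cur qA' rest hab h1' =>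
      obtain ⟨c, p⟩ := a
      obtain ⟨hcb, hup, hpV, hplen⟩ := hab
      dsimp only at hcb
      subst hcb
      obtain ⟨hlast, hrest⟩ := pvPop front back c rest hQ
      have hne : (front.isEmpty && back.isEmpty) = false := by
        rcases front with _ | ⟨_, _⟩
        · rcases back with _ | ⟨_, _⟩
          · simp at hQ
          · simp
        · simp
      dsimp only at hup hpV hplen ⊢
      simp only [pvALoop, pvBMain, hne, Bool.false_eq_true, if_false, hlast]
      by_cases hend : c = end_
      · subst hend
        simp only [if_true]
        obtain ⟨t, ht⟩ := pvUp_head hup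
        rw [pvUp_rebuild hup parent.items.length
          (by rw [List.length_reverse]; exact hplen) [c], ht]
        have hp : p = t.reverse ++ [c] := by
          have h' := congrArg List.reverse ht
          simpa using h'
        rw [hp]; simp
      · simp only [hend, if_false]
        have := pvScan_rel excl exclS hEx c p (pvAdjGet adjacency c) qA'
          ((if front.isEmpty then back.reverse else front).dropLast.reverse)
          (if front.isEmpty then ([] : List Int) else back) parent V
          (by rw [hrest]; exact h1') h2 hup hpV hplen
        obtain ⟨hVeq, hF, hK⟩ := this
        rw [hVeq]
        exact ih _ _ _ _ _ hF hK

-- ===== VERDICT (by name: the statement is the Claim_ definition above) =====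
theorem find_path_in_boundary_py_spec : Claim_equal_find_path_in_boundary_py := by
  intro adjacency start end_ exclude _
  unfold Spec_find_path_in_boundary_py find_path_in_boundary_py find_path_in_boundary_py_alt
  refine pvLoop_rel adjacency end_ (exclude.getD []) (PySem.Set.ofList (exclude.getD []))
    (fun x => pvContains_ofList _ x) (pvFuel adjacency) _ [start] [] _ _ ?_ ?_
  · refine List.forall₂_cons.mpr ⟨?_, List.forall₂_nil_left_iff.mpr rfl⟩
    refine ⟨rfl, pvUp.base start (PySem.Dict.get?_empty start), ?_, by simp⟩
    intro x hx
    simp at hx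
    simp [hx, PySem.Set.mem_ofList]
  · intro k hk
    rw [PySem.Dict.contains_empty] at hk
    exact absurd hk (by simp)
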